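-- pv_equiv track=rewrite | github.com/drinr1/permafrost | crypter.py | pe_checksum
-- ===== SOURCE A (Python) =====
-- def pe_checksum(pe_data, checksum_offset):
--     size = len(pe_data)
--     cksum = 0
--     for i in range(0, size & ~1, 2):
--         if checksum_offset <= i < checksum_offset + 4:
--             continue
--         val = pe_data[i] | (pe_data[i + 1] << 8)
--         cksum += val
--         cksum = (cksum & 0xFFFF) + (cksum >> 16)
--     if size & 1:
--         cksum += pe_data[-1]
--         cksum = (cksum & 0xFFFF) + (cksum >> 16)
--     cksum = (cksum & 0xFFFF) + (cksum >> 16)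
--     return cksum + size
-- ===== SOURCE B (Python) =====
-- def pe_checksum(pe_data, checksum_offset):
--     # Staged computation: one unconditional word sum, a two-probe correction for the
--     # skipped checksum field, and a single closed-form end-around-carry normalisation.
--     size = len(pe_data)
--     even = size & ~1
--     s = sum(pe_data[i] | (pe_data[i + 1] << 8) for i in range(0, even, 2))
--     if size & 1:
--         s += pe_data[-1]
--     start = checksum_offset + (checksum_offset & 1)
--     for i in (start, start + 2):
--         if 0 <= i < even:
--             s -= pe_data[i] | (pe_data[i + 1] << 8)
--     cksum = 0 if s == 0 else 1 + (s - 1) % 0xFFFF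
--     return cksum + size
-- ===== Notes on version B (the rewrite author's own statement) =====
-- stated objective: alternative
-- what changed: Replaces A's single loop that folds the 16-bit carry after every word and tests each index against the skip window with a staged computation: one unconditional plain integer sum of all words (plus the odd tail byte), a two-probe subtraction of the words starting at checksum_offset rounded up to even and that index plus 2, and a single closed-form end-around-carry normalisation 1 + (s-1) % 0xFFFF instead of any per-step folding.
-- outside the precondition, e.g. on pe_checksum([264504543, 1691110443], 1): A returns 65553, B returns 18
import Mathlib
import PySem

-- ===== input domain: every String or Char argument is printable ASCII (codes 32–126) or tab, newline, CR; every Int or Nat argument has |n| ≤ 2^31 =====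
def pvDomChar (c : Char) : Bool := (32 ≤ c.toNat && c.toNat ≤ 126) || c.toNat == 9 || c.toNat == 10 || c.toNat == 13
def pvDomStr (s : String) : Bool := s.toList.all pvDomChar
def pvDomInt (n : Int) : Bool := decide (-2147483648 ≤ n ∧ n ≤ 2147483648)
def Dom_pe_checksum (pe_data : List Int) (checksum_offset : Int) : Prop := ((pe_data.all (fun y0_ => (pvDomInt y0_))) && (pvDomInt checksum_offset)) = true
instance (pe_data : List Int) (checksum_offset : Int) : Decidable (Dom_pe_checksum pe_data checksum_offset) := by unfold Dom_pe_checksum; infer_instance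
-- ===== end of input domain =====

-- B replaces A's single loop (per-word skip test + per-word end-around-carry fold) by a
-- staged computation: an unconditional word sum, a two-probe subtraction for the skipped
-- checksum field, and one closed-form normalisation; objective: alternative (same O(n)).

-- ===== PORT A =====
def pe_checksum (pe_data : List Int) (checksum_offset : Int) : Int :=
  let size : Int := (pe_data.length : Int)
  let cksum : Int :=
    (PySem.List.pyRange 0 (PySem.Int.band size (Int.not 1)) 2).foldl
      (fun cksum i =>
        if checksum_offset ≤ i ∧ i < checksum_offset + 4 then cksum
        else
          let val := PySem.Int.bor (PySem.List.pyGetD pe_data i 0)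
                       ((PySem.List.pyGetD pe_data (i + 1) 0) <<< (8 : Nat))
          let cksum := cksum + val
          PySem.Int.band cksum 0xFFFF + (cksum >>> (16 : Nat))) 0
  let cksum : Int :=
    if PySem.Int.band size 1 ≠ 0 then
      let cksum := cksum + PySem.List.pyGetD pe_data (-1) 0
      PySem.Int.band cksum 0xFFFF + (cksum >>> (16 : Nat))
    else cksum
  let cksum : Int := PySem.Int.band cksum 0xFFFF + (cksum >>> (16 : Nat))
  cksum + size

-- ===== PORT B =====
def pe_checksum_alt (pe_data : List Int) (checksum_offset : Int) : Int :=
  let size : Int := (pe_data.length : Int)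
  let even : Int := PySem.Int.band size (Int.not 1)
  let s : Int :=
    (PySem.List.pyRange 0 even 2).foldl
      (fun s i => s + PySem.Int.bor (PySem.List.pyGetD pe_data i 0)
                        ((PySem.List.pyGetD pe_data (i + 1) 0) <<< (8 : Nat))) 0
  let s : Int := if PySem.Int.band size 1 ≠ 0 then s + PySem.List.pyGetD pe_data (-1) 0 else s
  let start : Int := checksum_offset + PySem.Int.band checksum_offset 1
  let s : Int :=
    [start, start + 2].foldl
      (fun s i =>
        if 0 ≤ i ∧ i < even then
          s - PySem.Int.bor (PySem.List.pyGetD pe_data i 0)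
                ((PySem.List.pyGetD pe_data (i + 1) 0) <<< (8 : Nat))
        else s) s
  let cksum : Int := if s = 0 then 0 else 1 + PySem.Int.mod (s - 1) 0xFFFF
  cksum + size

-- ===== PRECONDITION & SPEC =====
-- Pre_ restricts to the natural domain of a PE-image checksum: buffers of bytes
-- (every element in 0..255). Outside it A still returns, but its single final fold
-- can leave a >16-bit accumulator, an accident of A's per-step folding on non-byte ints.
def Pre_pe_checksum (pe_data : List Int) (checksum_offset : Int) : Prop :=
  ∀ x ∈ pe_data, 0 ≤ x ∧ x < 256
instance (pe_data : List Int) (checksum_offset : Int) : Decidable (Pre_pe_checksum pe_data checksum_offset) := by unfold Pre_pe_checksum; infer_instance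
def pvWitness_pe_checksum : List Int × Int := ([76, 1, 255, 254, 7], 0)
def Spec_pe_checksum (pe_data : List Int) (checksum_offset : Int) (out : Int) : Prop := out = pe_checksum_alt pe_data checksum_offset
instance (pe_data : List Int) (checksum_offset : Int) (out : Int) : Decidable (Spec_pe_checksum pe_data checksum_offset out) := by unfold Spec_pe_checksum; infer_instance

-- ===== CLAIM (what is proved, stated in full; the proofs are below) =====
def Claim_equal_pe_checksum : Prop := ∀ (pe_data : List Int) (checksum_offset : Int), Dom_pe_checksum pe_data checksum_offset → Pre_pe_checksum pe_data checksum_offset → Spec_pe_checksum pe_data checksum_offset (pe_checksum pe_data checksum_offset)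

-- ===== LEMMAS AND PROOFS =====

-- the 16-bit little-endian word at even offset i
def pvVal (xs : List Int) (i : Int) : Int :=
  PySem.Int.bor (PySem.List.pyGetD xs i 0) ((PySem.List.pyGetD xs (i + 1) 0) <<< (8 : Nat))

-- A's fold-add step and its end-around-carry folding
def pvFold (w : Int) : Int := PySem.Int.band w 0xFFFF + (w >>> (16 : Nat))
def pvF (c v : Int) : Int := pvFold (c + v)
-- B's closed-form normalisation
def pvNorm (s : Int) : Int := if s = 0 then 0 else 1 + PySem.Int.mod (s - 1) 65535

theorem pv_band_not_one (n : Nat) :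
    PySem.Int.band (n : Int) (Int.not 1) = ((2 * (n / 2) : Nat) : Int) := by
  simp [PySem.Int.band, Int.not]
  omega

theorem pv_pyRange_even (q : Nat) :
    PySem.List.pyRange 0 ((2 * q : Nat) : Int) 2 = (List.range q).map (fun k : Nat => 2 * (k : Int)) := by
  rw [PySem.List.pyRange_of_pos 0 ((2 * q : Nat) : Int) (by norm_num)]
  rcases Nat.eq_zero_or_pos q with h | h
  · subst h; simp
  · have hlt : (0 : Int) < ((2 * q : Nat) : Int) := by positivity
    rw [if_pos hlt]
    have he : ((((2 * q : Nat) : Int) - 0 + 2 - 1) / 2).toNat = q := by omega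
    rw [he]
    apply List.map_congr_left
    intro k _
    omega

theorem pvFold_arith (w : Int) (h : 0 ≤ w) : pvFold w = w % 65536 + w / 65536 := by
  unfold pvFold
  rw [PySem.Int.band_of_nonneg h (by norm_num), Int.shiftRight_eq_div_pow]
  have h1 : (Int.toNat 0xFFFF) = 65535 := by decide
  rw [h1]
  have h2 := Nat.and_two_pow_sub_one_eq_mod w.toNat 16
  norm_num at h2 ⊢
  omega

theorem pvF_arith (c v : Int) (h : 0 ≤ c + v) : pvF c v = (c + v) % 65536 + (c + v) / 65536 :=
  pvFold_arith (c + v) h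

-- the chain of per-step folds: bounds, residue mod 65535, and zero-detection
theorem pvChain (vs : List Int) : ∀ (c : Int), (∀ v ∈ vs, 0 ≤ v ∧ v ≤ 65535) → 0 ≤ c → c ≤ 65536 →
    0 ≤ vs.foldl pvF c ∧ vs.foldl pvF c ≤ 65536 ∧
    (vs.foldl pvF c) % 65535 = (c + vs.sum) % 65535 ∧ (vs.foldl pvF c = 0 ↔ c + vs.sum = 0) := by
  induction vs with
  | nil =>
      intro c _ h0 h1
      refine ⟨by simpa using h0, by simpa using h1, by simp, by simp⟩
  | cons v rest ih =>
      intro c hb h0 h1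
      have hv := hb v (by simp)
      have hrest : ∀ x ∈ rest, 0 ≤ x ∧ x ≤ 65535 := fun x hx => hb x (by simp [hx])
      have hsum : 0 ≤ rest.sum := List.sum_nonneg (fun x hx => (hrest x hx).1)
      have hcv : 0 ≤ c + v := by omega
      have harith := pvF_arith c v hcv
      have hc'0 : 0 ≤ pvF c v := by rw [harith]; omega
      have hc'1 : pvF c v ≤ 65536 := by rw [harith]; omega
      have hmod : (pvF c v) % 65535 = (c + v) % 65535 := by rw [harith]; omega
      have hz : pvF c v = 0 ↔ c + v = 0 := by rw [harith]; omega
      obtain ⟨r0, r1, rmod, rz⟩ := ih (pvF c v) hrest hc'0 hc'1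
      refine ⟨by simpa using r0, by simpa using r1, ?_, ?_⟩
      · simp only [List.foldl_cons, List.sum_cons]
        rw [rmod]
        omega
      · simp only [List.foldl_cons, List.sum_cons]
        rw [rz]
        have := hz
        omega

-- the final fold of A equals B's closed-form normalisation
theorem pvFinal (r S : Int) (h0 : 0 ≤ r) (h1 : r ≤ 65536) (hm : r % 65535 = S % 65535)
    (hz : r = 0 ↔ S = 0) (hS : 0 ≤ S) : pvFold r = pvNorm S := by
  rw [pvFold_arith r h0]
  unfold pvNorm
  rw [PySem.Int.mod_eq_emod_of_pos (by norm_num)]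
  split_ifs with h
  · omega
  · omega

-- A's skip-branch loop is the plain fold over the values at the non-skipped indices
theorem pv_foldl_skip (xs : List Int) (co : Int) : ∀ (l : List Int) (c : Int),
    l.foldl (fun c i => if co ≤ i ∧ i < co + 4 then c else pvF c (pvVal xs i)) c
    = ((l.filter (fun i => !decide (co ≤ i ∧ i < co + 4))).map (pvVal xs)).foldl pvF c := by
  intro l
  induction l with
  | nil => intro c; rfl
  | cons i rest ih =>
      intro c
      simp only [List.foldl_cons, List.filter_cons]
      cases hd : decide (co ≤ i ∧ i < co + 4) with
      | false =>
          rw [if_neg (of_decide_eq_false hd)]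
          simp only [Bool.not_false]
          exact ih (pvF c (pvVal xs i))
      | true =>
          rw [if_pos (of_decide_eq_true hd)]
          simp only [Bool.not_true, Bool.false_eq_true, if_false]
          exact ih c

-- which even indices are skipped: exactly t and t+2 for t = co + co % 2
theorem pv_skip_iff (co t i : Int) (ht : t = co + co % 2) (hi : i % 2 = 0) :
    (co ≤ i ∧ i < co + 4) ↔ (i = t ∨ i = t + 2) := by omega

-- sum of the kept words = sum of all words minus the (at most two) skipped words
theorem pv_probe_sum (xs : List Int) (co t : Int) (ht : t = co + co % 2) : ∀ q : Nat,
    ((((List.range q).map (fun k : Nat => 2 * (k : Int))).filter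
        (fun i => !decide (co ≤ i ∧ i < co + 4))).map (pvVal xs)).sum
    = (((List.range q).map (fun k : Nat => 2 * (k : Int))).map (pvVal xs)).sum
      - (if 0 ≤ t ∧ t < 2 * (q : Int) then pvVal xs t else 0)
      - (if 0 ≤ t + 2 ∧ t + 2 < 2 * (q : Int) then pvVal xs (t + 2) else 0) := by
  intro q
  induction q with
  | zero =>
      simp only [List.range_zero, List.map_nil, List.filter_nil, List.sum_nil]
      rw [if_neg (by omega), if_neg (by omega)]
      ring
  | succ q ih =>
      rw [List.range_succ]
      simp only [List.map_append, List.map_cons, List.map_nil, List.filter_append,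
        List.filter_cons, List.filter_nil, List.sum_append, List.sum_cons, List.sum_nil]
      rw [ih]
      have hskip : (co ≤ 2 * (q : Int) ∧ 2 * (q : Int) < co + 4) ↔
          (2 * (q : Int) = t ∨ 2 * (q : Int) = t + 2) :=
        pv_skip_iff co t _ ht (by omega)
      have hte : t % 2 = 0 := by omega
      by_cases hP : co ≤ 2 * (q : Int) ∧ 2 * (q : Int) < co + 4
      · have hcond : (!decide (co ≤ 2 * (q : Int) ∧ 2 * (q : Int) < co + 4)) = false := by
          simp [hP]
        rw [hcond]
        simp only [Bool.false_eq_true, if_false, List.map_nil, List.sum_nil, add_zero]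
        rcases hskip.mp hP with h1 | h2
        · rw [← h1]
          split_ifs <;> first | (exfalso; omega) | ring
        · rw [← h2]
          split_ifs <;> first | (exfalso; omega) | ring
      · have hcond : (!decide (co ≤ 2 * (q : Int) ∧ 2 * (q : Int) < co + 4)) = true := by
          simp [hP]
        rw [hcond]
        simp only [if_pos, List.map_cons, List.map_nil, List.sum_cons, List.sum_nil, add_zero]
        have h1 : ¬ (2 * (q : Int) = t) := fun h => hP (hskip.mpr (Or.inl h))
        have h2 : ¬ (2 * (q : Int) = t + 2) := fun h => hP (hskip.mpr (Or.inr h))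
        split_ifs <;> first | (exfalso; omega) | ring

-- bounds for a word built from two bytes
theorem pv_bor_bound (lo hi : Int) (h1 : 0 ≤ lo) (h2 : lo < 256) (h3 : 0 ≤ hi) (h4 : hi < 256) :
    0 ≤ PySem.Int.bor lo (hi <<< (8 : Nat)) ∧ PySem.Int.bor lo (hi <<< (8 : Nat)) ≤ 65535 := by
  rw [Int.shiftLeft_eq, PySem.Int.bor_of_nonneg h1 (by positivity)]
  refine ⟨by positivity, ?_⟩
  have hb : lo.toNat ||| (hi * 2 ^ 8).toNat < 2 ^ 16 := by
    apply Nat.or_lt_two_pow <;> omega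
  omega

theorem pv_val_bound (xs : List Int) (hPre : ∀ x ∈ xs, 0 ≤ x ∧ x < 256) (k : Nat)
    (hk : 2 * k + 1 < xs.length) : 0 ≤ pvVal xs (2 * (k : Int)) ∧ pvVal xs (2 * (k : Int)) ≤ 65535 := by
  unfold pvVal
  have e1 : (2 * (k : Int) + 1) = ((2 * k + 1 : Nat) : Int) := by push_cast; ring
  have e0 : (2 * (k : Int)) = ((2 * k : Nat) : Int) := by push_cast; ring
  rw [e1, e0, PySem.List.pyGetD_natCast, PySem.List.pyGetD_natCast]
  have hlo : xs.getD (2 * k) 0 ∈ xs := by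
    rw [List.getD_eq_getElem xs 0 (by omega)]; exact List.getElem_mem _
  have hhi : xs.getD (2 * k + 1) 0 ∈ xs := by
    rw [List.getD_eq_getElem xs 0 hk]; exact List.getElem_mem _
  obtain ⟨l1, l2⟩ := hPre _ hlo
  obtain ⟨m1, m2⟩ := hPre _ hhi
  exact pv_bor_bound _ _ l1 l2 m1 m2

-- the trailing byte is an element of the buffer
theorem pv_tail_mem (xs : List Int) (h : xs ≠ []) : PySem.List.pyGetD xs (-1) 0 ∈ xs := by
  have hl := List.length_pos_iff.mpr h
  exact PySem.List.pyGetD_mem xs 0 ⟨by omega, by omega⟩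

-- every kept word is a 16-bit value
theorem pv_incl_bound (xs : List Int) (co : Int) (hPre : ∀ x ∈ xs, 0 ≤ x ∧ x < 256) :
    ∀ v ∈ ((((List.range (xs.length / 2)).map (fun k : Nat => 2 * (k : Int))).filter
        (fun i => !decide (co ≤ i ∧ i < co + 4))).map (pvVal xs)), 0 ≤ v ∧ v ≤ 65535 := by
  intro v hv
  obtain ⟨i, hi, rfl⟩ := List.mem_map.mp hv
  obtain ⟨k, hk, rfl⟩ := List.mem_map.mp (List.mem_filter.mp hi).1
  exact pv_val_bound xs hPre k (by have := List.mem_range.mp hk; omega)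

-- ===== VERDICT (by name: the statement is the Claim_ definition above) =====
theorem pe_checksum_spec : Claim_equal_pe_checksum := by
  intro xs co _ hpre
  unfold Spec_pe_checksum pe_checksum pe_checksum_alt
  simp only [← pvFold.eq_def, ← pvVal.eq_def, ← pvF.eq_def, ← pvNorm.eq_def]
  rw [pv_band_not_one xs.length, pv_pyRange_even (xs.length / 2)]
  rw [pv_foldl_skip xs co, PySem.List.foldl_add _ (pvVal xs) 0]
  rw [PySem.Int.band_one co, PySem.Int.mod_eq_emod_of_pos (by norm_num)]
  have hband : PySem.Int.band ((xs.length : Int)) 1 = ((xs.length % 2 : Nat) : Int) := by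
    rw [PySem.Int.band_one]
    exact_mod_cast PySem.Int.mod_natCast xs.length 2
  have hcast : ((2 * (xs.length / 2) : Nat) : Int) = 2 * ((xs.length / 2 : Nat) : Int) := by
    push_cast; ring
  rw [hcast]
  simp only [List.foldl_cons, List.foldl_nil, zero_add]
  have hsumnn : ∀ v ∈ ((((List.range (xs.length / 2)).map (fun k : Nat => 2 * (k : Int))).filter
      (fun i => !decide (co ≤ i ∧ i < co + 4))).map (pvVal xs)), 0 ≤ v ∧ v ≤ 65535 :=
    pv_incl_bound xs co hpre
  by_cases hodd : PySem.Int.band ((xs.length : Int)) 1 ≠ 0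
  · -- odd length: a trailing byte is added on both sides
    rw [if_pos hodd, if_pos hodd]
    have hne : xs ≠ [] := by
      intro h
      rw [hband] at hodd
      subst h
      simp at hodd
    have htail := hpre _ (pv_tail_mem xs hne)
    have hb2 : ∀ v ∈ ((((List.range (xs.length / 2)).map (fun k : Nat => 2 * (k : Int))).filter
        (fun i => !decide (co ≤ i ∧ i < co + 4))).map (pvVal xs)) ++ [PySem.List.pyGetD xs (-1) 0],
        0 ≤ v ∧ v ≤ 65535 := by
      intro v hv
      rcases List.mem_append.mp hv with h | h
      · exact hsumnn v h
      · rcases List.mem_singleton.mp h with rfl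
        exact ⟨htail.1, by omega⟩
    obtain ⟨r0, r1, rmod, rz⟩ := pvChain _ 0 hb2 le_rfl (by norm_num)
    simp only [List.foldl_append, List.foldl_cons, List.foldl_nil, List.sum_append,
      List.sum_cons, List.sum_nil, zero_add, add_zero] at r0 r1 rmod rz
    rw [pvFinal _ _ r0 r1 rmod rz
      (add_nonneg (List.sum_nonneg fun v hv => (hsumnn v hv).1) htail.1)]
    congr 2
    rw [pv_probe_sum xs co (co + co % 2) rfl (xs.length / 2)]
    split_ifs <;> ring
  · rw [if_neg hodd, if_neg hodd]
    obtain ⟨r0, r1, rmod, rz⟩ := pvChain _ 0 hsumnn le_rfl (by norm_num)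
    simp only [zero_add] at rmod rz
    rw [pvFinal _ _ r0 r1 rmod rz (List.sum_nonneg fun v hv => (hsumnn v hv).1)]
    congr 2
    rw [pv_probe_sum xs co (co + co % 2) rfl (xs.length / 2)]
    split_ifs <;> ring
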